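-- pv_equiv track=rewrite | github.com/daalgi/algorithms | arrays/array_of_doubled_pairs.py | hashmap2
-- ===== SOURCE A (Python) =====
-- from typing import List
-- from collections import Counter
--
-- def hashmap2(arr: List[int]) -> bool:
--     # Time complexity: O(nlogn + n) = O(nlogn)
--     # Space complexity: O(n)
--
--     # Sort the array by absolute value, so
--     # the smallest value will only have one pair
--     # Note: faster runtime if done directly in the loop
--     # `for num in sorted(arr, key=abs)`
--     arr.sort(key=abs)
--
--     counter = Counter(arr)
--
--     for num in arr:
--         if counter[num] == 0:
--             # Current `num` already forming a pair
--             # with `num // 2` (in previous iterations)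
--             continue
--
--         if counter[2 * num] == 0:
--             # If `num` hasn't been paired yet,
--             # but `2 * num` doesn't exist
--             return False
--
--         # Update the counter
--         counter[num] -= 1
--         counter[2 * num] -= 1
--
--     return True
-- ===== SOURCE B (Python) =====
-- from typing import List
-- from collections import Counter
--
-- def hashmap2(arr: List[int]) -> bool:
--     # Recursive per-chain leftover check over the Counter (no mutation,
--     # no per-element greedy pass).  A value x absorbs the leftover of x/2
--     # (its chain predecessor); the array pairs up iff every value's
--     # leftover fits into the count of its double.
--     arr.sort(key=abs)
--     count = Counter(arr)
--
--     def leftover(x):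
--         # copies of x still unpaired after x absorbs the leftover of x // 2
--         if x == 0 or x % 2 != 0 or count[x // 2] == 0:
--             return count[x]
--         return count[x] - leftover(x // 2)
--
--     return all(leftover(x) <= count[2 * x] for x in count)
-- ===== Notes on version B (the rewrite author's own statement) =====
-- stated objective: alternative
-- what changed: A runs a mutating greedy pass over every element of the abs-sorted array, decrementing a Counter as it pairs; B never mutates the Counter: it checks, for each distinct value x, that the chain leftover computed by a recursive descent leftover(x) = count[x] - leftover(x//2) fits into count[2*x].
import Mathlib
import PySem

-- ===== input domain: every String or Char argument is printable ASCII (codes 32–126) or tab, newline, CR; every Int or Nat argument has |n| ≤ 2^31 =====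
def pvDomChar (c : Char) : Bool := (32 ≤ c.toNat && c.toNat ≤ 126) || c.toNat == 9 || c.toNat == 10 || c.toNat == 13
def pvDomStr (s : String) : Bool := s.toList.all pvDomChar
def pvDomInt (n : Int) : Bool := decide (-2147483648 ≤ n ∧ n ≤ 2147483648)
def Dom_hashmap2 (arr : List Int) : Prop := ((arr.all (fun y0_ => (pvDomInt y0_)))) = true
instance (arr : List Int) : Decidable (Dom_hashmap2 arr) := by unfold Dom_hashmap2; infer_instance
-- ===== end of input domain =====

-- B replaces A's mutating per-element greedy pass with a read-only recursive chain-leftover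
-- check per distinct value (objective: alternative). Both A and B sort `arr` in place in
-- Python; the theorems below are about the return value (that side effect is identical).

-- ===== PORT A =====
-- the `for num in arr: ...` loop of A with its early `return False`
def pvLoopA : List Int → PySem.Dict Int Int → Bool
  | [], _ => true
  | num :: rest, counter =>
    if counter.getD num 0 = 0 then pvLoopA rest counter
    else if counter.getD (2 * num) 0 = 0 then false
    else pvLoopA rest ((counter.modify num 0 (· - 1)).modify (2 * num) 0 (· - 1))

def hashmap2 (arr : List Int) : Bool :=
  let sortedArr := PySem.List.sorted arr (fun x => |x|) false   -- arr.sort(key=abs)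
  let counter := PySem.Dict.counter sortedArr                   -- Counter(arr)
  pvLoopA sortedArr counter

-- ===== PORT B =====
-- needed by pvLeftover's decreasing_by: an even nonzero x strictly shrinks under x // 2
theorem pvHalf_lt (x : Int) (h0 : x ≠ 0) (he : PySem.Int.mod x 2 = 0) :
    (PySem.Int.floordiv x 2).natAbs < x.natAbs := by
  rw [PySem.Int.floordiv_eq_ediv_of_pos (by omega)]
  rw [PySem.Int.mod_eq_emod_of_pos (by omega)] at he
  omega

-- the inner `def leftover(x): ...` of B
def pvLeftover (count : PySem.Dict Int Int) (x : Int) : Int :=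
  if x = 0 ∨ PySem.Int.mod x 2 ≠ 0 ∨ count.getD (PySem.Int.floordiv x 2) 0 = 0 then
    count.getD x 0
  else
    count.getD x 0 - pvLeftover count (PySem.Int.floordiv x 2)
termination_by x.natAbs
decreasing_by
  rename_i h
  push_neg at h
  exact pvHalf_lt x h.1 h.2.1

def hashmap2_alt (arr : List Int) : Bool :=
  let sortedArr := PySem.List.sorted arr (fun x => |x|) false   -- arr.sort(key=abs)
  let count := PySem.Dict.counter sortedArr                     -- count = Counter(arr)
  -- all(leftover(x) <= count[2 * x] for x in count)
  count.keys.all (fun x => pvLeftover count x ≤ count.getD (2 * x) 0)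

-- ===== PRECONDITION & SPEC =====
def Spec_hashmap2 (arr : List Int) (out : Bool) : Prop := out = hashmap2_alt arr
instance (arr : List Int) (out : Bool) : Decidable (Spec_hashmap2 arr out) := by unfold Spec_hashmap2; infer_instance

-- ===== CLAIM (what is proved, stated in full; the proofs are below) =====
def Claim_equal_hashmap2 : Prop := ∀ (arr : List Int), Dom_hashmap2 arr → Spec_hashmap2 arr (hashmap2 arr)

-- ===== LEMMAS AND PROOFS =====

-- abstract versions of A's loop on a pure counting function
def pvFA (g : Int → Int) (num : Int) : Option (Int → Int) :=
  if g num = 0 then some g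
  else if g (2 * num) = 0 then none
  else
    let g1 := Function.update g num (g num - 1)
    some (Function.update g1 (2 * num) (g1 (2 * num) - 1))
def pvRunA : List Int → (Int → Int) → Option (Int → Int)
  | [], g => some g
  | n :: t, g => match pvFA g n with
    | none => none
    | some g' => pvRunA t g'
-- a bulk per-distinct-key pass on a pure counting function (proof intermediary)
def pvRunB : List Int → (Int → Int) → Bool
  | [], _ => true
  | x :: t, g =>
    if g x > g (2 * x) then false
    else pvRunB t (Function.update g (2 * x) (g (2 * x) - g x))
-- pvLeftover on a pure counting function
def pvLf (g : Int → Int) (x : Int) : Int :=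
  if x = 0 ∨ PySem.Int.mod x 2 ≠ 0 ∨ g (PySem.Int.floordiv x 2) = 0 then g x
  else g x - pvLf g (PySem.Int.floordiv x 2)
termination_by x.natAbs
decreasing_by
  rename_i h
  push_neg at h
  exact pvHalf_lt x h.1 h.2.1

theorem pvLeftover_eq_Lf (count : PySem.Dict Int Int) :
    ∀ x : Int, pvLeftover count x = pvLf (fun k => count.getD k 0) x := by
  intro x
  induction x using pvLeftover.induct count with
  | case1 x h => rw [pvLeftover.eq_def, pvLf.eq_def, if_pos h, if_pos h]
  | case2 x h ih => rw [pvLeftover.eq_def, pvLf.eq_def, if_neg h, if_neg h, ih]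

theorem pvLoopA_eq_runA : ∀ (L : List Int) (d : PySem.Dict Int Int),
    pvLoopA L d = (pvRunA L (fun k => d.getD k 0)).isSome := by
  intro L
  induction L with
  | nil => intro d; simp [pvLoopA, pvRunA]
  | cons num rest ih =>
    intro d
    simp only [pvLoopA, pvRunA, pvFA]
    by_cases h1 : d.getD num 0 = 0
    · simpa [h1] using ih d
    · by_cases h2 : d.getD (2 * num) 0 = 0
      · simp [h1, h2, pvRunA]
      · simp only [h1, h2, if_neg, if_false]
        rw [ih]
        have : (fun k => ((d.modify num 0 (· - 1)).modify (2 * num) 0 (· - 1)).getD k 0)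
            = Function.update (Function.update (fun k => d.getD k 0) num (d.getD num 0 - 1)) (2 * num)
                ((Function.update (fun k => d.getD k 0) num (d.getD num 0 - 1)) (2 * num) - 1) := by
          funext k
          simp only [PySem.Dict.getD_modify, Function.update]
          split_ifs <;> simp_all
        simp [this, pvRunA]

theorem pvRunA_skip {g : Int → Int} {n : Int} (t : List Int) (h : g n = 0) :
    pvRunA (n :: t) g = pvRunA t g := by simp [pvRunA, pvFA, h]

theorem pvRunA_fail {g : Int → Int} {n : Int} (t : List Int) (h1 : g n ≠ 0) (h2 : g (2 * n) = 0) :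
    pvRunA (n :: t) g = none := by simp [pvRunA, pvFA, h1, h2]

theorem pvRunA_pair {g : Int → Int} {n : Int} (t : List Int) (h1 : g n ≠ 0) (h2 : g (2 * n) ≠ 0) :
    pvRunA (n :: t) g = pvRunA t (Function.update (Function.update g n (g n - 1)) (2 * n)
      (Function.update g n (g n - 1) (2 * n) - 1)) := by simp [pvRunA, pvFA, h1, h2]

theorem pvClassRun (x : Int) (hx : x ≠ 0) :
    ∀ (C : List Int) (g : Int → Int),
      (∀ y ∈ C, y = x ∨ y = -x) →
      0 ≤ g x → g x ≤ C.count x → 0 ≤ g (2 * x) →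
      0 ≤ g (-x) → g (-x) ≤ C.count (-x) → 0 ≤ g (2 * -x) →
      pvRunA C g =
        if g x ≤ g (2 * x) ∧ g (-x) ≤ g (2 * -x) then
          some (fun k =>
            if k = x then 0 else if k = -x then 0
            else if k = 2 * x then g (2 * x) - g x
            else if k = 2 * -x then g (2 * -x) - g (-x)
            else g k)
        else none := by
  intro C
  induction C with
  | nil =>
    intro g hmem h1 h2 h3 h4 h5 h6
    simp only [List.count_nil] at h2 h5
    have hx0 : g x = 0 := le_antisymm (by exact_mod_cast h2) h1
    have hnx0 : g (-x) = 0 := le_antisymm (by exact_mod_cast h5) h4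
    rw [if_pos ⟨by omega, by omega⟩]
    simp only [pvRunA]
    congr 1
    funext k
    split_ifs with k1 k2 k3 k4 <;> subst_vars <;> omega
  | cons y C ih =>
    intro g hmem h1 h2 h3 h4 h5 h6
    have hyx : y = x ∨ y = -x := hmem y (by simp)
    -- key distinctness facts
    have d1 : x ≠ -x := by omega
    have d2 : (2:Int) * x ≠ x := by omega
    have d3 : (2:Int) * x ≠ -x := by omega
    have d4 : (2:Int) * -x ≠ x := by omega
    have d5 : (2:Int) * -x ≠ -x := by omega
    have d6 : (2:Int) * x ≠ 2 * -x := by omega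
    rcases hyx with h | h <;> rw [h] at hmem h2 h5 ⊢
    · -- y = x
      by_cases hgx : g x = 0
      · rw [pvRunA_skip C hgx]
        rw [ih g (fun z hz => hmem z (by simp [hz])) h1
            (by have hc5_ := h2; simp [List.count_cons, d1, d1.symm] at hc5_; omega) h3 h4
            (by have hc5_ := h5; simp [List.count_cons, d1, d1.symm] at hc5_; omega) h6]
      · by_cases hg2x : g (2 * x) = 0
        · rw [pvRunA_fail C hgx hg2x, if_neg (by omega)]
        · rw [pvRunA_pair C hgx hg2x]
          set g' := Function.update (Function.update g x (g x - 1)) (2 * x)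
              (Function.update g x (g x - 1) (2 * x) - 1) with hg'
          rw [Function.update_of_ne d2] at hg'
          have e1 : g' x = g x - 1 := by
            rw [hg', Function.update_of_ne d2.symm, Function.update_self]
          have e2 : g' (2 * x) = g (2 * x) - 1 := by
            rw [hg', Function.update_self]
          have e3 : g' (-x) = g (-x) := by
            rw [hg', Function.update_of_ne d3.symm, Function.update_of_ne (Ne.symm d1)]
          have e4 : g' (2 * -x) = g (2 * -x) := by
            rw [hg', Function.update_of_ne d6.symm, Function.update_of_ne d4]
          rw [ih g' (fun z hz => hmem z (by simp [hz]))
              (by omega) (by have hc5_ := h2; simp [List.count_cons, d1, d1.symm] at hc5_; omega) (by omega)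
              (by omega) (by have hc5_ := h5; simp [List.count_cons, d1, d1.symm] at hc5_; omega) (by omega)]
          rw [e1, e2, e3, e4]
          have hcond : (g x - 1 ≤ g (2*x) - 1 ∧ g (-x) ≤ g (2 * -x)) ↔ (g x ≤ g (2*x) ∧ g (-x) ≤ g (2 * -x)) := by omega
          by_cases hc : g x ≤ g (2*x) ∧ g (-x) ≤ g (2 * -x)
          · rw [if_pos (hcond.mpr hc), if_pos hc]
            congr 1
            funext k
            split_ifs with k1 k2 k3 k4
            · rfl
            · rfl
            · omega
            · omega
            · show g' k = g k
              rw [hg', Function.update_of_ne k3, Function.update_of_ne k1]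
          · rw [if_neg (fun h => hc (hcond.mp h)), if_neg hc]
    · -- y = -x
      by_cases hgx : g (-x) = 0
      · rw [pvRunA_skip C hgx]
        rw [ih g (fun z hz => hmem z (by simp [hz])) h1
            (by have hc5_ := h2; simp [List.count_cons, d1, d1.symm] at hc5_; omega) h3 h4
            (by have hc5_ := h5; simp [List.count_cons, d1, d1.symm] at hc5_; omega) h6]
      · by_cases hg2x : g (2 * -x) = 0
        · rw [pvRunA_fail C hgx hg2x, if_neg (by omega)]
        · rw [pvRunA_pair C hgx hg2x]
          set g' := Function.update (Function.update g (-x) (g (-x) - 1)) (2 * -x)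
              (Function.update g (-x) (g (-x) - 1) (2 * -x) - 1) with hg'
          rw [Function.update_of_ne d5] at hg'
          have e1 : g' (-x) = g (-x) - 1 := by
            rw [hg', Function.update_of_ne d5.symm, Function.update_self]
          have e2 : g' (2 * -x) = g (2 * -x) - 1 := by
            rw [hg', Function.update_self]
          have e3 : g' x = g x := by
            rw [hg', Function.update_of_ne d4.symm, Function.update_of_ne d1]
          have e4 : g' (2 * x) = g (2 * x) := by
            rw [hg', Function.update_of_ne d6, Function.update_of_ne d3]
          rw [ih g' (fun z hz => hmem z (by simp [hz]))
              (by omega) (by have hc5_ := h2; simp [List.count_cons, d1, d1.symm] at hc5_; omega) (by omega)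
              (by omega) (by have hc5_ := h5; simp [List.count_cons, d1, d1.symm] at hc5_; omega) (by omega)]
          rw [e1, e2, e3, e4]
          have hcond : (g x ≤ g (2*x) ∧ g (-x) - 1 ≤ g (2 * -x) - 1) ↔ (g x ≤ g (2*x) ∧ g (-x) ≤ g (2 * -x)) := by omega
          by_cases hc : g x ≤ g (2*x) ∧ g (-x) ≤ g (2 * -x)
          · rw [if_pos (hcond.mpr hc), if_pos hc]
            congr 1
            funext k
            split_ifs with k1 k2 k3 k4
            · rfl
            · rfl
            · omega
            · omega
            · show g' k = g k
              rw [hg', Function.update_of_ne k4, Function.update_of_ne k2]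
          · rw [if_neg (fun h => hc (hcond.mp h)), if_neg hc]

theorem pvZeroRun : ∀ (C : List Int) (g : Int → Int), (∀ y ∈ C, y = (0 : Int)) →
    ∃ z, pvRunA C g = some (Function.update g 0 z) := by
  intro C
  induction C with
  | nil =>
    intro g _
    exact ⟨g 0, by simp [pvRunA, Function.update_eq_self]⟩
  | cons y C ih =>
    intro g hmem
    have hy : y = 0 := hmem y (by simp)
    subst hy
    by_cases h0 : g 0 = 0
    · rw [pvRunA_skip C h0]; exact ih g (fun z hz => hmem z (by simp [hz]))
    · rw [pvRunA_pair C h0 (by simpa using h0)]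
      have hg' : Function.update (Function.update g 0 (g 0 - 1)) (2 * 0)
            (Function.update g 0 (g 0 - 1) (2 * 0) - 1) = Function.update g 0 (g 0 - 2) := by
        have h20 : (2 : Int) * 0 = 0 := by norm_num
        rw [h20, Function.update_idem, Function.update_self]
        congr 1
        omega
      rw [hg']
      obtain ⟨z, hz⟩ := ih _ (fun z hz => hmem z (by simp [hz]))
      exact ⟨z, by rw [hz, Function.update_idem]⟩

theorem pvAdd_of_mem {s : List Int} {y : Int} (h : y ∈ s) : PySem.Set.add s y = s := by
  simp [PySem.Set.add, PySem.Set.contains, h]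

theorem pvAdd_of_not_mem {s : List Int} {y : Int} (h : y ∉ s) : PySem.Set.add s y = s ++ [y] := by
  simp [PySem.Set.add, PySem.Set.contains, h]

theorem pvFoldlAdd_saturated : ∀ (l s : List Int), (∀ y ∈ l, y ∈ s) →
    l.foldl PySem.Set.add s = s := by
  intro l
  induction l with
  | nil => intro s _; rfl
  | cons y l ih =>
    intro s h
    rw [List.foldl_cons, pvAdd_of_mem (h y (by simp))]
    exact ih s (fun z hz => h z (by simp [hz]))

theorem pvFoldlAdd_prefix : ∀ (R s t : List Int), (∀ y ∈ R, y ∉ s) →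
    R.foldl PySem.Set.add (s ++ t) = s ++ R.foldl PySem.Set.add t := by
  intro R
  induction R with
  | nil => intro s t _; rfl
  | cons y R ih =>
    intro s t h
    rw [List.foldl_cons, List.foldl_cons]
    have hys : y ∉ s := h y (by simp)
    by_cases hyt : y ∈ t
    · rw [pvAdd_of_mem (by simp [hyt] : y ∈ s ++ t), pvAdd_of_mem hyt]
      exact ih s t (fun z hz => h z (by simp [hz]))
    · rw [pvAdd_of_not_mem (by simp [hys, hyt]), pvAdd_of_not_mem hyt, List.append_assoc]
      exact ih s (t ++ [y]) (fun z hz => h z (by simp [hz]))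

theorem pvOfList_append_disjoint (C R : List Int) (h : ∀ y ∈ R, y ∉ C) :
    PySem.Set.ofList (C ++ R) = PySem.Set.ofList C ++ PySem.Set.ofList R := by
  have h1 : PySem.Set.ofList (C ++ R) = R.foldl PySem.Set.add (PySem.Set.ofList C) := by
    rw [PySem.Set.ofList_eq_foldl, PySem.Set.ofList_eq_foldl, List.foldl_append]
  rw [h1, PySem.Set.ofList_eq_foldl]
  have h2 : ∀ y ∈ R, y ∉ PySem.Set.ofList C := by
    intro y hy
    rw [PySem.Set.mem_ofList]
    exact h y hy
  calc R.foldl PySem.Set.add (PySem.Set.ofList C)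
      = R.foldl PySem.Set.add (PySem.Set.ofList C ++ []) := by rw [List.append_nil]
    _ = PySem.Set.ofList C ++ R.foldl PySem.Set.add [] := pvFoldlAdd_prefix R _ [] h2

theorem pvOfList_class (x : Int) : ∀ (C : List Int), (∀ y ∈ C, y = x ∨ y = -x) →
    PySem.Set.ofList (x :: C) = if -x ∈ C ∧ x ≠ 0 then [x, -x] else [x] := by
  intro C
  induction C with
  | nil => intro _; simp [PySem.Set.ofList]
  | cons y C ih =>
    intro h
    have hy : y = x ∨ y = -x := h y (by simp)
    have step : PySem.Set.ofList (x :: y :: C) = (y :: C).foldl PySem.Set.add [x] := by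
      rw [PySem.Set.ofList_eq_foldl]; rfl
    rcases hy with rfl | rfl
    · -- y = x
      rw [step, List.foldl_cons, pvAdd_of_mem (by simp)]
      have := ih (fun z hz => h z (by simp [hz]))
      rw [PySem.Set.ofList_eq_foldl] at this
      have this2 : C.foldl PySem.Set.add [y] = if -y ∈ C ∧ y ≠ 0 then [y, -y] else [y] := by
        simpa using this
      rw [this2]
      by_cases hx0 : y = 0
      · simp [hx0]
      · have : (-y ∈ y :: C ∧ y ≠ 0) ↔ (-y ∈ C ∧ y ≠ 0) := by
          constructor
          · rintro ⟨hm, hn⟩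
            rcases List.mem_cons.mp hm with he | hm'
            · omega
            · exact ⟨hm', hn⟩
          · rintro ⟨hm, hn⟩; exact ⟨by simp [hm], hn⟩
        rw [if_congr this rfl rfl]
    · -- y = -x
      by_cases hx0 : x = 0
      · subst hx0
        simp only [neg_zero] at h step ⊢
        rw [step, List.foldl_cons, pvAdd_of_mem (by simp)]
        have hall : ∀ z ∈ C, z ∈ [(0:Int)] := by
          intro z hz; rcases h z (by simp [hz]) with h' | h' <;> simp [h']
        rw [pvFoldlAdd_saturated C [0] hall]
        simp
      · -- x ≠ 0, y = -x ∈ head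
        rw [step, List.foldl_cons, pvAdd_of_not_mem (by simp; omega)]
        have : ∀ z ∈ C, z ∈ [x] ++ [-x] := by
          intro z hz; rcases h z (by simp [hz]) with h' | h' <;> simp [h']
        rw [pvFoldlAdd_saturated C ([x] ++ [-x]) this]
        simp [hx0]

theorem pvOfList_sublist_aux : ∀ (L s : List Int), ∃ r, L.foldl PySem.Set.add s = s ++ r ∧ r.Sublist L := by
  intro L
  induction L with
  | nil => intro s; exact ⟨[], by simp⟩
  | cons y L ih =>
    intro s
    rw [List.foldl_cons]
    by_cases hy : y ∈ s
    · obtain ⟨r, hr, hs⟩ := ih s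
      rw [pvAdd_of_mem hy] at *
      exact ⟨r, hr, hs.cons y⟩
    · obtain ⟨r, hr, hs⟩ := ih (s ++ [y])
      rw [pvAdd_of_not_mem hy]
      exact ⟨y :: r, by simpa using hr, hs.cons₂ y⟩

theorem pvOfList_sublist (L : List Int) : (PySem.Set.ofList L).Sublist L := by
  obtain ⟨r, hr, hs⟩ := pvOfList_sublist_aux L []
  rw [PySem.Set.ofList_eq_foldl, hr]
  simpa using hs

theorem pvRunA_append : ∀ (C R : List Int) (g : Int → Int),
    pvRunA (C ++ R) g = match pvRunA C g with
      | none => none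
      | some g' => pvRunA R g' := by
  intro C
  induction C with
  | nil => intro R g; rfl
  | cons y C ih =>
    intro R g
    show pvRunA (y :: (C ++ R)) g = _
    simp only [pvRunA]
    cases pvFA g y with
    | none => rfl
    | some g' => exact ih R g'

theorem pvSplit : ∀ (L : List Int) (a : Int), L.Pairwise (fun p q => |p| ≤ |q|) →
    (∀ y ∈ L, a ≤ |y|) →
    ∃ C R, L = C ++ R ∧ (∀ y ∈ C, |y| = a) ∧ (∀ y ∈ R, a < |y|) := by
  intro L
  induction L with
  | nil => intro a _ _; exact ⟨[], [], by simp, by simp, by simp⟩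
  | cons y L ih =>
    intro a hpw hlo
    by_cases hy : |y| = a
    · have hpw' := List.pairwise_cons.mp hpw
      obtain ⟨C, R, hCR, hC, hR⟩ := ih a hpw'.2 (fun z hz => hy ▸ hpw'.1 z hz)
      exact ⟨y :: C, R, by simp [hCR], by simpa [hy] using hC, hR⟩
    · have ha : a < |y| := lt_of_le_of_ne (hlo y (by simp)) (Ne.symm hy)
      refine ⟨[], y :: L, by simp, by simp, ?_⟩
      intro z hz
      rcases List.mem_cons.mp hz with rfl | hz'
      · exact ha
      · exact lt_of_lt_of_le ha ((List.pairwise_cons.mp hpw).1 z hz')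

theorem pvRunB_fail {g : Int → Int} {x : Int} (K : List Int) (h : g x > g (2 * x)) :
    pvRunB (x :: K) g = false := by simp [pvRunB, h]

theorem pvRunB_ok {g : Int → Int} {x : Int} (K : List Int) (h : ¬ g x > g (2 * x)) :
    pvRunB (x :: K) g = pvRunB K (Function.update g (2 * x) (g (2 * x) - g x)) := by
  simp [pvRunB, h]

theorem pvMaster : ∀ (n : Nat) (L : List Int) (gA gB : Int → Int),
    L.length ≤ n →
    L.Pairwise (fun a b => |a| ≤ |b|) →
    (∀ k : Int, k ≠ 0 → 0 ≤ gA k ∧ gA k ≤ L.count k) →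
    (∀ k ∈ PySem.Set.ofList L, gA k = gB k ∧ gA (2 * k) = gB (2 * k)) →
    (pvRunA L gA).isSome = pvRunB (PySem.Set.ofList L) gB := by
  intro n
  induction n with
  | zero =>
    intro L gA gB hlen _ _ _
    have hnil : L = [] := List.eq_nil_of_length_eq_zero (Nat.le_zero.mp hlen)
    subst hnil
    simp [pvRunA, pvRunB, PySem.Set.ofList]
  | succ n ih =>
    intro L gA gB hlen hpw hA hagree
    cases L with
    | nil => simp [pvRunA, pvRunB, PySem.Set.ofList]
    | cons x t =>
      obtain ⟨C0, R, hCR, hC, hR⟩ := pvSplit (x :: t) |x| hpw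
        (by
          intro y hy
          rcases List.mem_cons.mp hy with rfl | hy'
          · exact le_refl _
          · exact (List.pairwise_cons.mp hpw).1 y hy')
      cases C0 with
      | nil =>
        exact absurd (hR x (by rw [show R = x :: t from hCR.symm]; simp)) (lt_irrefl _)
      | cons c C' =>
        rw [List.cons_append] at hCR
        injection hCR with hcx ht
        subst hcx
        have hCR' : x :: t = (x :: C') ++ R := by rw [List.cons_append, ht]
        have hCmem : ∀ y ∈ x :: C', y = x ∨ y = -x := fun y hy => abs_eq_abs.mp (hC y hy)
        have hCmem' : ∀ y ∈ C', y = x ∨ y = -x := fun y hy => hCmem y (by simp [hy])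
        have hRC : ∀ y ∈ R, y ∉ x :: C' := by
          intro y hy hmem
          have h1 := hC y hmem
          have h2 := hR y hy
          omega
        have hofL : PySem.Set.ofList ((x :: C') ++ R) = PySem.Set.ofList (x :: C') ++ PySem.Set.ofList R :=
          pvOfList_append_disjoint _ _ hRC
        have hcount : ∀ k : Int, (x :: t).count k = (x :: C').count k + R.count k := by
          intro k; rw [hCR', List.count_append]
        have hRzero : ∀ k : Int, |k| ≤ |x| → R.count k = 0 := by
          intro k hk
          exact List.count_eq_zero.mpr (fun hmem => absurd (hR k hmem) (by omega))
        have hCzero : ∀ k : Int, k ≠ x → k ≠ -x → (x :: C').count k = 0 := by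
          intro k h1 h2
          refine List.count_eq_zero.mpr (fun hmem => ?_)
          rcases hCmem k hmem with rfl | h
          · exact h1 rfl
          · exact h2 h
        have hlenR : R.length ≤ n := by
          have hl1 := congrArg List.length hCR'
          simp [List.length_append] at hl1
          have hl2 : t.length + 1 ≤ n + 1 := by simpa using hlen
          omega
        have hpwR : R.Pairwise (fun a b => |a| ≤ |b|) :=
          (List.pairwise_append.mp (hCR' ▸ hpw)).2.1
        have hxK : x ∈ PySem.Set.ofList (x :: t) := (PySem.Set.mem_ofList _ _).mpr (by simp)
        have hmemR : ∀ k ∈ PySem.Set.ofList R, k ∈ PySem.Set.ofList (x :: t) := by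
          intro k hk
          rw [PySem.Set.mem_ofList] at hk ⊢
          rw [hCR']
          simp [hk]
        by_cases hx0 : x = 0
        · -- zero class
          subst hx0
          have hmem0 : ∀ y ∈ (0 : Int) :: C', y = (0 : Int) := by
            intro y hy; rcases hCmem y hy with h | h <;> omega
          obtain ⟨z, hz⟩ := pvZeroRun _ gA hmem0
          rw [hCR', pvRunA_append, hz]
          have hofC : PySem.Set.ofList ((0 : Int) :: C') = [(0 : Int)] := by
            rw [pvOfList_class 0 C' hCmem']
            simp
          rw [hofL, hofC]
          have hstep : ¬ gB 0 > gB (2 * 0) := by norm_num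
          rw [List.singleton_append, pvRunB_ok _ hstep]
          have hupd : Function.update gB (2 * 0) (gB (2 * 0) - gB 0) = Function.update gB 0 0 := by
            have h20 : (2 : Int) * 0 = 0 := by norm_num
            rw [h20, sub_self]
          rw [hupd]
          refine ih R _ _ hlenR hpwR ?_ ?_
          · intro k hk
            rw [Function.update_of_ne hk]
            have h1 := hA k hk
            have h2 := hcount k
            have h3 := hCzero k hk (by omega)
            omega
          · intro k hk
            have hkL := hmemR k hk
            have hkR : k ∈ R := (PySem.Set.mem_ofList _ _).mp hk
            have hkgt : 0 < |k| := by simpa using hR k hkR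
            have hk0 : k ≠ 0 := by rintro rfl; simp at hkgt
            rw [Function.update_of_ne hk0, Function.update_of_ne hk0,
                Function.update_of_ne (by omega : (2 : Int) * k ≠ 0),
                Function.update_of_ne (by omega : (2 : Int) * k ≠ 0)]
            exact hagree k hkL
        · -- x ≠ 0 class
          have h2x0 : (2 : Int) * x ≠ 0 := by omega
          have hn0 : -x ≠ 0 := by omega
          have h2n0 : (2 : Int) * -x ≠ 0 := by omega
          have hAx := hA x hx0
          have hAnx := hA (-x) hn0
          have hA2x := hA (2 * x) h2x0
          have hA2nx := hA (2 * -x) h2n0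
          have hcx := hcount x
          have hcnx := hcount (-x)
          have hrx := hRzero x (le_refl _)
          have hrnx := hRzero (-x) (le_of_eq (abs_neg x))
          have hclass := pvClassRun x hx0 (x :: C') gA hCmem
            hAx.1 (by omega) hA2x.1 hAnx.1 (by omega) hA2nx.1
          rw [hCR', pvRunA_append, hclass]
          have hagx := hagree x hxK
          obtain ⟨hagx1, hagx2⟩ := hagx
          by_cases hneg : -x ∈ C'
          · -- keys [x, -x]
            have hnxL : -x ∈ PySem.Set.ofList (x :: t) := by
              rw [PySem.Set.mem_ofList, hCR']
              simp [hneg]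
            obtain ⟨hagnx1, hagnx2⟩ := hagree (-x) hnxL
            have hofC : PySem.Set.ofList (x :: C') = [x, -x] := by
              rw [pvOfList_class x C' hCmem', if_pos ⟨hneg, hx0⟩]
            rw [hofL, hofC]
            rw [show ([x, -x] ++ PySem.Set.ofList R) = x :: -x :: PySem.Set.ofList R from rfl]
            by_cases hcond : gA x ≤ gA (2 * x) ∧ gA (-x) ≤ gA (2 * -x)
            · rw [if_pos hcond]
              obtain ⟨hcond1, hcond2⟩ := hcond
              have hs1 : ¬ gB x > gB (2 * x) := by omega
              rw [pvRunB_ok _ hs1]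
              have hs2 : ¬ (Function.update gB (2 * x) (gB (2 * x) - gB x)) (-x) >
                  (Function.update gB (2 * x) (gB (2 * x) - gB x)) (2 * -x) := by
                intro hgt
                rw [Function.update_of_ne (by omega : -x ≠ 2 * x),
                    Function.update_of_ne (by omega : (2 : Int) * -x ≠ 2 * x)] at hgt
                omega
              rw [pvRunB_ok _ hs2]
              refine ih R _ _ hlenR hpwR ?_ ?_
              · intro k hk
                have hAk := hA k hk
                have hck := hcount k
                show 0 ≤ (if k = x then 0 else if k = -x then 0
                    else if k = 2 * x then gA (2 * x) - gA x
                    else if k = 2 * -x then gA (2 * -x) - gA (-x) else gA k) ∧ _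
                split_ifs with k1 k2 k3 k4
                · exact ⟨le_refl 0, Int.natCast_nonneg _⟩
                · exact ⟨le_refl 0, Int.natCast_nonneg _⟩
                · subst k3
                  have hcz := hCzero (2 * x) (by omega) (by omega)
                  omega
                · subst k4
                  have hcz := hCzero (2 * -x) (by omega) (by omega)
                  omega
                · have hcz := hCzero k k1 k2
                  omega
              · intro k hk
                have hkL := hmemR k hk
                have hkR : k ∈ R := (PySem.Set.mem_ofList _ _).mp hk
                have hkgt : |x| < |k| := hR k hkR
                have hax1 : x ≤ |x| := le_abs_self x
                have hax2 : -x ≤ |x| := neg_le_abs x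
                have hak : |k| = k ∨ |k| = -k := abs_choice k
                have hak0 : 0 ≤ |k| := abs_nonneg k
                obtain ⟨hagk1, hagk2⟩ := hagree k hkL
                constructor <;>
                  · simp only [Function.update_apply]
                    split_ifs <;> omega
            · rw [if_neg hcond]
              simp only [Option.isSome_none]
              by_cases hp : gA x ≤ gA (2 * x)
              · have hq : gA (-x) > gA (2 * -x) := by
                  rcases not_and_or.mp hcond with h | h <;> omega
                have hs1 : ¬ gB x > gB (2 * x) := by omega
                rw [pvRunB_ok _ hs1, pvRunB_fail _ (by
                  rw [Function.update_of_ne (by omega : -x ≠ 2 * x),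
                      Function.update_of_ne (by omega : (2 : Int) * -x ≠ 2 * x)]
                  omega)]
              · rw [pvRunB_fail _ (by omega)]
          · -- key [x] only
            have hccnx : (x :: C').count (-x) = 0 := by
              refine List.count_eq_zero.mpr (fun hmem => ?_)
              rcases List.mem_cons.mp hmem with h | h
              · omega
              · exact hneg h
            have hganx : gA (-x) = 0 := by omega
            have hofC : PySem.Set.ofList (x :: C') = [x] := by
              rw [pvOfList_class x C' hCmem', if_neg (by tauto)]
            rw [hofL, hofC, List.singleton_append]
            by_cases hcond : gA x ≤ gA (2 * x) ∧ gA (-x) ≤ gA (2 * -x)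
            · rw [if_pos hcond]
              obtain ⟨hcond1, hcond2⟩ := hcond
              have hs1 : ¬ gB x > gB (2 * x) := by omega
              rw [pvRunB_ok _ hs1]
              refine ih R _ _ hlenR hpwR ?_ ?_
              · intro k hk
                have hAk := hA k hk
                have hck := hcount k
                show 0 ≤ (if k = x then 0 else if k = -x then 0
                    else if k = 2 * x then gA (2 * x) - gA x
                    else if k = 2 * -x then gA (2 * -x) - gA (-x) else gA k) ∧ _
                split_ifs with k1 k2 k3 k4
                · exact ⟨le_refl 0, Int.natCast_nonneg _⟩
                · exact ⟨le_refl 0, Int.natCast_nonneg _⟩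
                · subst k3
                  have hcz := hCzero (2 * x) (by omega) (by omega)
                  omega
                · subst k4
                  have hcz := hCzero (2 * -x) (by omega) (by omega)
                  omega
                · have hcz := hCzero k k1 k2
                  omega
              · intro k hk
                have hkL := hmemR k hk
                have hkR : k ∈ R := (PySem.Set.mem_ofList _ _).mp hk
                have hkgt : |x| < |k| := hR k hkR
                have hax1 : x ≤ |x| := le_abs_self x
                have hax2 : -x ≤ |x| := neg_le_abs x
                have hak : |k| = k ∨ |k| = -k := abs_choice k
                have hak0 : 0 ≤ |k| := abs_nonneg k
                obtain ⟨hagk1, hagk2⟩ := hagree k hkL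
                have k1 : k ≠ x := by omega
                have k2 : k ≠ -x := by omega
                have k2k1 : (2 : Int) * k ≠ x := by omega
                have k2k2 : (2 : Int) * k ≠ -x := by omega
                have k2k3 : (2 : Int) * k ≠ 2 * x := by omega
                have k2k4 : (2 : Int) * k ≠ 2 * -x := by omega
                refine ⟨?_, ?_⟩
                · show (if k = x then 0 else if k = -x then 0
                    else if k = 2 * x then gA (2 * x) - gA x
                    else if k = 2 * -x then gA (2 * -x) - gA (-x) else gA k) =
                      Function.update gB (2 * x) (gB (2 * x) - gB x) k
                  rw [if_neg k1, if_neg k2]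
                  by_cases k3 : k = 2 * x
                  · subst k3
                    rw [if_pos rfl, Function.update_self]
                    omega
                  · by_cases k4 : k = 2 * -x
                    · subst k4
                      rw [if_neg k3, if_pos rfl, Function.update_of_ne (by omega : (2 : Int) * -x ≠ 2 * x)]
                      omega
                    · rw [if_neg k3, if_neg k4, Function.update_of_ne k3]
                      exact hagk1
                · show (if 2 * k = x then 0 else if 2 * k = -x then 0
                    else if 2 * k = 2 * x then gA (2 * x) - gA x
                    else if 2 * k = 2 * -x then gA (2 * -x) - gA (-x) else gA (2 * k)) =
                      Function.update gB (2 * x) (gB (2 * x) - gB x) (2 * k)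
                  rw [if_neg k2k1, if_neg k2k2, if_neg k2k3, if_neg k2k4, Function.update_of_ne k2k3]
                  exact hagk2
            · rw [if_neg hcond]
              simp only [Option.isSome_none]
              have hq : gA x > gA (2 * x) := by
                rcases not_and_or.mp hcond with h | h <;> omega
              rw [pvRunB_fail _ (by omega)]

-- ===== new bridge: the bulk pass equals the chain-leftover check =====

theorem pvEven_double_half {z : Int} (h : PySem.Int.mod z 2 = 0) :
    2 * PySem.Int.floordiv z 2 = z := by
  have := PySem.Int.floordiv_mul_add_mod z 2
  omega

theorem pvHalf_double (x : Int) : PySem.Int.floordiv (2 * x) 2 = x := by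
  rw [PySem.Int.floordiv_eq_ediv_of_pos (by omega)]
  omega

theorem pvMod_double (x : Int) : PySem.Int.mod (2 * x) 2 = 0 := by
  rw [PySem.Int.mod_eq_emod_of_pos (by omega)]
  omega

theorem pvLf_head {g : Int → Int} {x : Int}
    (h : x = 0 ∨ PySem.Int.mod x 2 ≠ 0 ∨ g (PySem.Int.floordiv x 2) = 0) :
    pvLf g x = g x := by
  rw [pvLf, if_pos h]

theorem pvLf_double {g : Int → Int} {x : Int} (hx : x ≠ 0) (hg : g x ≠ 0) :
    pvLf g (2 * x) = g (2 * x) - pvLf g x := by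
  have hcond : ¬(2 * x = 0 ∨ PySem.Int.mod (2 * x) 2 ≠ 0 ∨
      g (PySem.Int.floordiv (2 * x) 2) = 0) := by
    rw [pvMod_double, pvHalf_double]
    rintro (h | h | h)
    · omega
    · exact h rfl
    · exact hg h
  rw [pvLf.eq_def, if_neg hcond, pvHalf_double]

theorem pvRunB_eq_all (g0 : Int → Int) :
    ∀ (R : List Int) (g : Int → Int),
      R.Pairwise (fun a b => |a| ≤ |b|) →
      R.Nodup →
      (∀ x ∈ R, g0 x ≠ 0) →
      (∀ z : Int, z ≠ 0 →
        g z = if PySem.Int.mod z 2 = 0 ∧ g0 (PySem.Int.floordiv z 2) ≠ 0 ∧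
                PySem.Int.floordiv z 2 ∉ R then pvLf g0 z else g0 z) →
      pvRunB R g = R.all (fun x => decide (pvLf g0 x ≤ g0 (2 * x))) := by
  intro R
  induction R with
  | nil => intro g _ _ _ _; rfl
  | cons x R' ih =>
    intro g hpw hnd hkey hinv
    have hpw' := List.pairwise_cons.mp hpw
    have hnd' := List.nodup_cons.mp hnd
    by_cases hx0 : x = 0
    · -- the zero key: its test is trivially true on both sides
      subst hx0
      have hcond : ¬ g 0 > g (2 * 0) := by norm_num
      rw [pvRunB_ok _ hcond]
      have hlf0 : pvLf g0 0 = g0 0 := pvLf_head (Or.inl rfl)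
      have hall0 : decide (pvLf g0 0 ≤ g0 (2 * 0)) = true := by
        simp [hlf0]
      rw [List.all_cons, hall0, Bool.true_and]
      apply ih _ hpw'.2 hnd'.2 (fun z hz => hkey z (by simp [hz]))
      intro z hz
      have h20 : (2 : Int) * 0 = 0 := by norm_num
      rw [h20, Function.update_of_ne hz, hinv z hz]
      have hguard : (PySem.Int.mod z 2 = 0 ∧ g0 (PySem.Int.floordiv z 2) ≠ 0 ∧
            PySem.Int.floordiv z 2 ∉ (0 :: R' : List Int)) ↔
          (PySem.Int.mod z 2 = 0 ∧ g0 (PySem.Int.floordiv z 2) ≠ 0 ∧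
            PySem.Int.floordiv z 2 ∉ R') := by
        constructor
        · rintro ⟨a, b, c⟩; exact ⟨a, b, fun hm => c (List.mem_cons_of_mem _ hm)⟩
        · rintro ⟨a, b, c⟩
          refine ⟨a, b, fun hm => ?_⟩
          rcases List.mem_cons.mp hm with h0 | hm'
          · have := pvEven_double_half a
            omega
          · exact c hm'
      rw [if_congr hguard rfl rfl]
    · -- a nonzero key
      have hgx : g x = pvLf g0 x := by
        rw [hinv x hx0]
        by_cases hh : PySem.Int.mod x 2 = 0 ∧ g0 (PySem.Int.floordiv x 2) ≠ 0
        · have hhalf_ne : PySem.Int.floordiv x 2 ∉ (x :: R' : List Int) := by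
            intro hm
            have hzz := pvEven_double_half hh.1
            rcases List.mem_cons.mp hm with he | hm'
            · omega
            · have h1 : |x| ≤ |PySem.Int.floordiv x 2| := hpw'.1 _ hm'
              have habs : |x| = 2 * |PySem.Int.floordiv x 2| := by
                rw [← hzz, abs_mul]; norm_num
              have h2 : |PySem.Int.floordiv x 2| ≤ 0 := by omega
              have h3 : PySem.Int.floordiv x 2 = 0 := by
                have := abs_nonneg (PySem.Int.floordiv x 2)
                exact abs_eq_zero.mp (le_antisymm h2 this)
              omega
          rw [if_pos ⟨hh.1, hh.2, hhalf_ne⟩]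
        · rw [if_neg (by tauto)]
          rw [pvLf_head (by tauto)]
      have hg2x : g (2 * x) = g0 (2 * x) := by
        rw [hinv (2 * x) (by omega)]
        rw [if_neg]
        rintro ⟨-, -, hc⟩
        exact hc (by rw [pvHalf_double]; simp)
      by_cases hcond : g x > g (2 * x)
      · rw [pvRunB_fail _ hcond, List.all_cons]
        have : decide (pvLf g0 x ≤ g0 (2 * x)) = false := by
          rw [hgx, hg2x] at hcond
          simpa using hcond
        rw [this, Bool.false_and]
      · rw [pvRunB_ok _ hcond, List.all_cons]
        have : decide (pvLf g0 x ≤ g0 (2 * x)) = true := by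
          rw [hgx, hg2x] at hcond
          simpa using hcond
        rw [this, Bool.true_and]
        apply ih _ hpw'.2 hnd'.2 (fun z hz => hkey z (by simp [hz]))
        intro z hz
        by_cases hz2x : z = 2 * x
        · subst hz2x
          rw [Function.update_self, hgx, hg2x]
          rw [if_pos ⟨pvMod_double x, by rw [pvHalf_double]; exact ⟨hkey x (by simp), hnd'.1⟩⟩]
          rw [pvLf_double hx0 (hkey x (by simp))]
        · rw [Function.update_of_ne hz2x, hinv z hz]
          have hguard : (PySem.Int.mod z 2 = 0 ∧ g0 (PySem.Int.floordiv z 2) ≠ 0 ∧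
                PySem.Int.floordiv z 2 ∉ (x :: R' : List Int)) ↔
              (PySem.Int.mod z 2 = 0 ∧ g0 (PySem.Int.floordiv z 2) ≠ 0 ∧
                PySem.Int.floordiv z 2 ∉ R') := by
            constructor
            · rintro ⟨a, b, c⟩; exact ⟨a, b, fun hm => c (List.mem_cons_of_mem _ hm)⟩
            · rintro ⟨a, b, c⟩
              refine ⟨a, b, fun hm => ?_⟩
              rcases List.mem_cons.mp hm with h0 | hm'
              · have := pvEven_double_half a
                omega
              · exact c hm'
          rw [if_congr hguard rfl rfl]

theorem hashmap2_equal (arr : List Int) : hashmap2 arr = hashmap2_alt arr := by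
  show pvLoopA (PySem.List.sorted arr (fun x => |x|) false)
      (PySem.Dict.counter (PySem.List.sorted arr (fun x => |x|) false)) = _
  set S := PySem.List.sorted arr (fun x => |x|) false with hS
  set cnt := PySem.Dict.counter S with hcnt
  have hpwS : S.Pairwise (fun a b => |a| ≤ |b|) := PySem.List.sorted_pairwise arr (fun x : Int => |x|)
  have hg : (fun k => cnt.getD k 0) = fun k : Int => ((S.count k : Nat) : Int) := by
    funext k; rw [hcnt, PySem.Dict.getD_counter]
  set g0 : Int → Int := fun k : Int => ((S.count k : Nat) : Int) with hg0
  have hstep1 : pvLoopA S cnt = pvRunB (PySem.Set.ofList S) g0 := by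
    rw [pvLoopA_eq_runA, hg]
    exact pvMaster S.length S _ _ (le_refl _) hpwS
      (fun k _ => ⟨Int.natCast_nonneg _, le_refl _⟩)
      (fun k _ => ⟨rfl, rfl⟩)
  have hstep2 : pvRunB (PySem.Set.ofList S) g0 =
      (PySem.Set.ofList S).all (fun x => decide (pvLf g0 x ≤ g0 (2 * x))) := by
    apply pvRunB_eq_all
    · exact hpwS.sublist (pvOfList_sublist S)
    · exact PySem.Set.nodup_ofList S
    · intro x hx
      have : x ∈ S := (PySem.Set.mem_ofList _ _).mp hx
      have : 0 < S.count x := List.count_pos_iff.mpr this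
      simp only [hg0]
      omega
    · intro z hz
      rw [if_neg]
      rintro ⟨-, hne, hnm⟩
      apply hnm
      rw [PySem.Set.mem_ofList]
      simp only [hg0] at hne
      have : 0 < S.count (PySem.Int.floordiv z 2) := by omega
      exact List.count_pos_iff.mp this
  show _ = (PySem.Dict.counter S).keys.all
      (fun x => decide (pvLeftover (PySem.Dict.counter S) x ≤ (PySem.Dict.counter S).getD (2 * x) 0))
  rw [hstep1, hstep2, ← hcnt, PySem.Dict.keys_counter]
  congr 1
  funext x
  rw [pvLeftover_eq_Lf, hg, PySem.Dict.getD_counter]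

-- ===== VERDICT (by name: the statement is the Claim_ definition above) =====
theorem hashmap2_spec : Claim_equal_hashmap2 := by
  intro arr _
  show hashmap2 arr = hashmap2_alt arr
  exact hashmap2_equal arr
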